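-- pv_equiv track=rewrite | github.com/FaroukElk/rosalind | Common_Ancestor/Common_Ancestor.py | Common_Ancestor
-- ===== SOURCE A (Python) =====
-- def Common_Ancestor(A_count, T_count, G_count, C_count):
-- 	common_sequence = ""
-- 	for i in range(len(A_count)):
-- 		if A_count[i] >= T_count[i] and A_count[i] >= C_count[i] and A_count[i] >= G_count[i]:
-- 			common_sequence += "A"
-- 		elif T_count[i] >= A_count[i] and T_count[i] >= C_count[i] and T_count[i] >= G_count[i]:
-- 			common_sequence += "T"
-- 		elif G_count[i] >= A_count[i] and G_count[i] >= T_count[i] and G_count[i] >= C_count[i]: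
-- 			common_sequence += "G"
-- 		elif C_count[i] >= A_count[i] and C_count[i] >= T_count[i] and C_count[i] >= G_count[i]:
-- 			common_sequence += "C"
-- 	return common_sequence
-- ===== SOURCE B (Python) =====
-- def Common_Ancestor(A_count, T_count, G_count, C_count):
--     # Staged running-max: start with letter "A" everywhere, then sweep the T, G, C
--     # count lists one after the other, overwriting a column only on a STRICT improvement
--     # (strict ">" preserves the A > T > G > C tie-break of the original).
--     n = len(A_count)
--     best = [A_count[i] for i in range(n)]
--     letters = ["A"] * n
--     for letter, counts in (("T", T_count), ("G", G_count), ("C", C_count)):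
--         for i in range(n):
--             if counts[i] > best[i]:
--                 best[i] = counts[i]
--                 letters[i] = letter
--     return "".join(letters)
-- ===== Notes on version B (the rewrite author's own statement) =====
-- stated objective: alternative
-- what changed: Replaces the per-column four-way comparison cascade by a staged running-max: B initialises the answer to 'A' with A_count as the running best, then sweeps the T, G and C count lists one letter at a time, overwriting a column only on a strict improvement (strict '>' reproduces the A>T>G>C tie-break), and joins at the end.
import Mathlib
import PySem

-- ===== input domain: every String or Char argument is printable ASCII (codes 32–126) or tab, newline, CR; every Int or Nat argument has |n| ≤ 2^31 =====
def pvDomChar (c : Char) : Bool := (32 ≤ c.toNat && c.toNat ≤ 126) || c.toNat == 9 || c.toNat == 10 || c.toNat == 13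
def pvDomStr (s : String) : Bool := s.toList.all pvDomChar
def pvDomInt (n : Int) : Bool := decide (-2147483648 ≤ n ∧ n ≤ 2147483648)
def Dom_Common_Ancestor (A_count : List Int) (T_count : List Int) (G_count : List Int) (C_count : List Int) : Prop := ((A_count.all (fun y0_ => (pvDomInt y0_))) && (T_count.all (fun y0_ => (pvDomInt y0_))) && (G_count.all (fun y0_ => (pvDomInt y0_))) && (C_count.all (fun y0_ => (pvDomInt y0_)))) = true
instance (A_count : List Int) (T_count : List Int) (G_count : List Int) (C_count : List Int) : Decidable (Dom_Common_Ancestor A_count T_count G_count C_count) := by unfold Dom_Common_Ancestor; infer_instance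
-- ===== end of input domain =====

-- B replaces A's per-column four-way comparison cascade by a staged running-max:
-- start with 'A' everywhere, then sweep the T, G, C lists in turn, overwriting a column
-- only on a strict improvement (objective: alternative; return value only, no mutation).

-- ===== PORT A =====
def Common_Ancestor (A_count : List Int) (T_count : List Int) (G_count : List Int) (C_count : List Int) : String :=
  (PySem.List.pyRange 0 (A_count.length : Int) 1).foldl (fun s i =>
    match PySem.List.pyGet? A_count i, PySem.List.pyGet? T_count i,
          PySem.List.pyGet? G_count i, PySem.List.pyGet? C_count i with
    | some a, some t, some g, some c =>
      if a ≥ t ∧ a ≥ c ∧ a ≥ g then s ++ "A"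
      else if t ≥ a ∧ t ≥ c ∧ t ≥ g then s ++ "T"
      else if g ≥ a ∧ g ≥ t ∧ g ≥ c then s ++ "G"
      else if c ≥ a ∧ c ≥ t ∧ c ≥ g then s ++ "C"
      else s
    | _, _, _, _ => s) ""   -- none = IndexError in Python; those inputs are excluded by Pre_

-- ===== PORT B =====
def Common_Ancestor_alt (A_count : List Int) (T_count : List Int) (G_count : List Int) (C_count : List Int) : String :=
  let n := A_count.length
  -- best = [A_count[i] for i in range(n)]; the index is always in range since n = len(A_count)
  let best : List Int := (List.range n).map (fun (i : Nat) => PySem.List.pyGetD A_count (i : Int) 0)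
  let letters : List Char := List.replicate n 'A'
  let final := [('T', T_count), ('G', G_count), ('C', C_count)].foldl
    (fun (st : List Int × List Char) (p : Char × List Int) =>
      (List.range n).foldl (fun (st : List Int × List Char) (i : Nat) =>
        match PySem.List.pyGet? p.2 (i : Int) with
        | none => st   -- IndexError in Python; those inputs are excluded by Pre_
        | some ci => if st.1.getD i 0 < ci then (st.1.set i ci, st.2.set i p.1) else st) st)
    (best, letters)
  String.ofList final.2

-- ===== PRECONDITION & SPEC =====
-- Pre_ excludes exactly the inputs where Python A raises IndexError: some T/G/C list shorter than A_count.
def Pre_Common_Ancestor (A_count : List Int) (T_count : List Int) (G_count : List Int) (C_count : List Int) : Prop :=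
  A_count.length ≤ T_count.length ∧ A_count.length ≤ G_count.length ∧ A_count.length ≤ C_count.length
instance (A_count : List Int) (T_count : List Int) (G_count : List Int) (C_count : List Int) : Decidable (Pre_Common_Ancestor A_count T_count G_count C_count) := by unfold Pre_Common_Ancestor; infer_instance
def pvWitness_Common_Ancestor : List Int × List Int × List Int × List Int := ([1, 0], [0, 2], [0, 0], [0, 0])

def Spec_Common_Ancestor (A_count : List Int) (T_count : List Int) (G_count : List Int) (C_count : List Int) (out : String) : Prop := out = Common_Ancestor_alt A_count T_count G_count C_count
instance (A_count : List Int) (T_count : List Int) (G_count : List Int) (C_count : List Int) (out : String) : Decidable (Spec_Common_Ancestor A_count T_count G_count C_count out) := by unfold Spec_Common_Ancestor; infer_instance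

-- ===== CLAIM (what is proved, stated in full; the proofs are below) =====
def Claim_equal_Common_Ancestor : Prop := ∀ (A_count : List Int) (T_count : List Int) (G_count : List Int) (C_count : List Int), Dom_Common_Ancestor A_count T_count G_count C_count → Pre_Common_Ancestor A_count T_count G_count C_count → Spec_Common_Ancestor A_count T_count G_count C_count (Common_Ancestor A_count T_count G_count C_count)

-- ===== LEMMAS AND PROOFS =====

-- A's loop body, named for the proofs (definitionally the port's body).
def pvStepA (A_count T_count G_count C_count : List Int) (s : String) (i : Int) : String :=
  match PySem.List.pyGet? A_count i, PySem.List.pyGet? T_count i,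
        PySem.List.pyGet? G_count i, PySem.List.pyGet? C_count i with
  | some a, some t, some g, some c =>
    if a ≥ t ∧ a ≥ c ∧ a ≥ g then s ++ "A"
    else if t ≥ a ∧ t ≥ c ∧ t ≥ g then s ++ "T"
    else if g ≥ a ∧ g ≥ t ∧ g ≥ c then s ++ "G"
    else if c ≥ a ∧ c ≥ t ∧ c ≥ g then s ++ "C"
    else s
  | _, _, _, _ => s

-- B's strict running-max update on one column, and the composed per-column letter.
def pvUpd (st : Int × Char) (c : Int) (L : Char) : Int × Char := if st.1 < c then (c, L) else st

def pvPick (a t g c : Int) : Char := (pvUpd (pvUpd (pvUpd (a, 'A') t 'T') g 'G') c 'C').2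

-- B's inner pass for one (letter, counts) pair, named for the proofs.
def pvPass (n : Nat) (L : Char) (cs : List Int) (st : List Int × List Char) : List Int × List Char :=
  (List.range n).foldl (fun (st : List Int × List Char) (i : Nat) =>
    match PySem.List.pyGet? cs (i : Int) with
    | none => st
    | some ci => if st.1.getD i 0 < ci then (st.1.set i ci, st.2.set i L) else st) st

lemma pvA_eq (A_count T_count G_count C_count : List Int) :
    Common_Ancestor A_count T_count G_count C_count
      = (PySem.List.pyRange 0 (A_count.length : Int) 1).foldl (pvStepA A_count T_count G_count C_count) "" := rfl

lemma pvB_eq (A_count T_count G_count C_count : List Int) :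
    Common_Ancestor_alt A_count T_count G_count C_count
      = String.ofList ((pvPass A_count.length 'C' C_count
          (pvPass A_count.length 'G' G_count
            (pvPass A_count.length 'T' T_count
              ((List.range A_count.length).map (fun (i : Nat) => PySem.List.pyGetD A_count (i : Int) 0),
               List.replicate A_count.length 'A')))).2) := rfl

-- what one pass does, pointwise: strict running-max against cs on the first n columns
lemma pvPass_spec (L : Char) (cs : List Int) (N : Nat) (hcs : N ≤ cs.length) :
    ∀ (n : Nat), n ≤ N → ∀ (b : List Int) (l : List Char), b.length = N → l.length = N →
      (pvPass n L cs (b, l)).1.length = N ∧ (pvPass n L cs (b, l)).2.length = N ∧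
      (∀ j : Nat, (pvPass n L cs (b, l)).1.getD j 0
          = if j < n ∧ b.getD j 0 < cs.getD j 0 then cs.getD j 0 else b.getD j 0) ∧
      (∀ j : Nat, (pvPass n L cs (b, l)).2.getD j 'A'
          = if j < n ∧ b.getD j 0 < cs.getD j 0 then L else l.getD j 'A') := by
  intro n
  induction n with
  | zero =>
      intro _ b l hb hl
      refine ⟨hb, hl, fun j => ?_, fun j => ?_⟩ <;> simp [pvPass]
  | succ m ih =>
      intro hm b l hb hl
      obtain ⟨hb1, hl1, hB, hL⟩ := ih (by omega) b l hb hl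
      have hmcs : m < cs.length := by omega
      have hstep : pvPass (m + 1) L cs (b, l)
          = (fun (st : List Int × List Char) =>
              match PySem.List.pyGet? cs (m : Int) with
              | none => st
              | some ci => if st.1.getD m 0 < ci then (st.1.set m ci, st.2.set m L) else st)
            (pvPass m L cs (b, l)) := by
        simp [pvPass, List.range_succ, List.foldl_append]
      rw [hstep, PySem.List.pyGet?_ofNat cs m hmcs]
      have hcsm : cs[m] = cs.getD m 0 := (List.getD_eq_getElem cs 0 hmcs).symm
      have hbm : (pvPass m L cs (b, l)).1.getD m 0 = b.getD m 0 := by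
        rw [hB m]; simp
      simp only [hbm, hcsm]
      by_cases hcond : b.getD m 0 < cs.getD m 0
      · simp only [hcond, if_true]
        refine ⟨by simp [hb1], by simp [hl1], fun j => ?_, fun j => ?_⟩
        · by_cases hjm : j = m
          · subst hjm
            rw [if_pos ⟨Nat.lt_succ_self j, hcond⟩,
              List.getD_eq_getElem _ _ (by rw [List.length_set]; omega)]
            simp
          · have : ((pvPass m L cs (b, l)).1.set m (cs.getD m 0)).getD j 0
                = (pvPass m L cs (b, l)).1.getD j 0 := by
              simp [List.getD_eq_getElem?_getD, Ne.symm hjm]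
            rw [this, hB j]
            have : (j < m + 1 ∧ b.getD j 0 < cs.getD j 0) ↔ (j < m ∧ b.getD j 0 < cs.getD j 0) := by
              constructor <;> rintro ⟨h1, h2⟩ <;> exact ⟨by omega, h2⟩
            rw [if_congr this rfl rfl]
        · by_cases hjm : j = m
          · subst hjm
            rw [if_pos ⟨Nat.lt_succ_self j, hcond⟩,
              List.getD_eq_getElem _ _ (by rw [List.length_set]; omega)]
            simp
          · have : ((pvPass m L cs (b, l)).2.set m L).getD j 'A'
                = (pvPass m L cs (b, l)).2.getD j 'A' := by
              simp [List.getD_eq_getElem?_getD, Ne.symm hjm]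
            rw [this, hL j]
            have : (j < m + 1 ∧ b.getD j 0 < cs.getD j 0) ↔ (j < m ∧ b.getD j 0 < cs.getD j 0) := by
              constructor <;> rintro ⟨h1, h2⟩ <;> exact ⟨by omega, h2⟩
            rw [if_congr this rfl rfl]
      · simp only [hcond, if_false]
        refine ⟨hb1, hl1, fun j => ?_, fun j => ?_⟩
        · rw [hB j]
          by_cases hjm : j = m
          · subst hjm
            rw [if_neg (fun h => hcond h.2), if_neg (fun h => hcond h.2)]
          · have : (j < m + 1 ∧ b.getD j 0 < cs.getD j 0) ↔ (j < m ∧ b.getD j 0 < cs.getD j 0) := by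
              constructor <;> rintro ⟨h1, h2⟩ <;> refine ⟨?_, h2⟩ <;> omega
            rw [if_congr this rfl rfl]
        · rw [hL j]
          by_cases hjm : j = m
          · subst hjm
            rw [if_neg (fun h => hcond h.2), if_neg (fun h => hcond h.2)]
          · have : (j < m + 1 ∧ b.getD j 0 < cs.getD j 0) ↔ (j < m ∧ b.getD j 0 < cs.getD j 0) := by
              constructor <;> rintro ⟨h1, h2⟩ <;> refine ⟨?_, h2⟩ <;> omega
            rw [if_congr this rfl rfl]

-- the final letters list is the per-column pick, as a map over range
lemma pvB_letters (A_count T_count G_count C_count : List Int)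
    (hT : A_count.length ≤ T_count.length) (hG : A_count.length ≤ G_count.length)
    (hC : A_count.length ≤ C_count.length) :
    (pvPass A_count.length 'C' C_count
      (pvPass A_count.length 'G' G_count
        (pvPass A_count.length 'T' T_count
          ((List.range A_count.length).map (fun (i : Nat) => PySem.List.pyGetD A_count (i : Int) 0),
           List.replicate A_count.length 'A')))).2
    = (List.range A_count.length).map (fun j =>
        pvPick (A_count.getD j 0) (T_count.getD j 0) (G_count.getD j 0) (C_count.getD j 0)) := by
  set n := A_count.length with hn
  set b0 : List Int := (List.range n).map (fun (i : Nat) => PySem.List.pyGetD A_count (i : Int) 0) with hb0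
  set l0 : List Char := List.replicate n 'A' with hl0
  have hb0len : b0.length = n := by simp [hb0]
  have hl0len : l0.length = n := by simp [hl0]
  have hb0get : ∀ j, j < n → b0.getD j 0 = A_count.getD j 0 := by
    intro j hj
    rw [hb0, PySem.List.getD_map_range _ n j 0 hj]
    simp
  have hl0get : ∀ j, l0.getD j 'A' = 'A' := by
    intro j
    by_cases hj : j < n
    · rw [hl0, List.getD_eq_getElem _ _ (by simpa using hj)]; simp
    · rw [hl0, List.getD_eq_default _ _ (by simpa using hj)]
  obtain ⟨h1b, h1l, hB1, hL1⟩ := pvPass_spec 'T' T_count n hT n le_rfl b0 l0 hb0len hl0len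
  obtain ⟨h2b, h2l, hB2, hL2⟩ := pvPass_spec 'G' G_count n hG n le_rfl _ _ h1b h1l
  obtain ⟨h3b, h3l, hB3, hL3⟩ := pvPass_spec 'C' C_count n hC n le_rfl _ _ h2b h2l
  apply List.ext_getElem (by simp [h3l])
  intro j hj1 hj2
  have hjn : j < n := by simpa [h3l] using hj1
  rw [← List.getD_eq_getElem _ 'A' hj1]
  rw [List.getElem_map, List.getElem_range, hL3 j, hB2 j, hL2 j, hB1 j, hL1 j, hb0get j hjn, hl0get j]
  simp only [hjn, true_and, pvPick, pvUpd]
  split_ifs <;> rfl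

set_option maxHeartbeats 1000000 in
-- one step of A appends exactly B's pick for that column
lemma pvStep_push (A_count T_count G_count C_count : List Int) (s : String) (i : Nat)
    (hA : i < A_count.length) (hT : i < T_count.length)
    (hG : i < G_count.length) (hC : i < C_count.length) :
    pvStepA A_count T_count G_count C_count s (i : Int)
      = s ++ String.ofList [pvPick (A_count.getD i 0) (T_count.getD i 0) (G_count.getD i 0) (C_count.getD i 0)] := by
  have eA := PySem.List.pyGet?_ofNat A_count i hA
  have eT := PySem.List.pyGet?_ofNat T_count i hT
  have eG := PySem.List.pyGet?_ofNat G_count i hG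
  have eC := PySem.List.pyGet?_ofNat C_count i hC
  have dA : A_count[i] = A_count.getD i 0 := (List.getD_eq_getElem _ 0 hA).symm
  have dT : T_count[i] = T_count.getD i 0 := (List.getD_eq_getElem _ 0 hT).symm
  have dG : G_count[i] = G_count.getD i 0 := (List.getD_eq_getElem _ 0 hG).symm
  have dC : C_count[i] = C_count.getD i 0 := (List.getD_eq_getElem _ 0 hC).symm
  simp only [pvStepA, eA, eT, eG, eC, dA, dT, dG, dC, pvPick, pvUpd]
  by_cases h1 : A_count.getD i 0 < T_count.getD i 0 <;>
    by_cases h2 : T_count.getD i 0 < G_count.getD i 0 <;>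
      by_cases h3 : A_count.getD i 0 < G_count.getD i 0 <;>
        by_cases h4 : G_count.getD i 0 < C_count.getD i 0 <;>
          by_cases h5 : T_count.getD i 0 < C_count.getD i 0 <;>
            by_cases h6 : A_count.getD i 0 < C_count.getD i 0 <;>
              simp only [h1, h2, h3, h4, h5, h6, if_true, if_false] <;>
              first
                | rfl
                | (split_ifs <;> first | rfl | omega)

lemma pvFold_eq (A_count T_count G_count C_count : List Int)
    (hT : A_count.length ≤ T_count.length) (hG : A_count.length ≤ G_count.length)
    (hC : A_count.length ≤ C_count.length) :
    ∀ (n : Nat), n ≤ A_count.length → ∀ (s : String),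
      (PySem.List.pyRange 0 (n : Int) 1).foldl (pvStepA A_count T_count G_count C_count) s
        = s ++ String.ofList ((List.range n).map (fun j =>
            pvPick (A_count.getD j 0) (T_count.getD j 0) (G_count.getD j 0) (C_count.getD j 0))) := by
  intro n
  induction n with
  | zero =>
      intro _ s
      rw [PySem.List.pyRange_one_eq_nil (by omega)]
      simp
  | succ m ih =>
      intro hm s
      have hsplit : PySem.List.pyRange 0 ((m + 1 : Nat) : Int) 1
          = PySem.List.pyRange 0 (m : Int) 1 ++ [(m : Int)] := by
        push_cast
        exact PySem.List.pyRange_one_succ_right (by omega)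
      rw [hsplit, List.foldl_append, ih (by omega), List.range_succ, List.map_append]
      simp only [List.foldl, List.map]
      rw [pvStep_push A_count T_count G_count C_count _ m (by omega) (by omega) (by omega) (by omega)]
      rw [String.append_assoc, ← String.ofList_append]

-- ===== VERDICT (by name: the statement is the Claim_ definition above) =====
theorem Common_Ancestor_spec : Claim_equal_Common_Ancestor := by
  intro A_count T_count G_count C_count _ hpre
  obtain ⟨hT, hG, hC⟩ := hpre
  unfold Spec_Common_Ancestor
  rw [pvA_eq, pvB_eq, pvB_letters A_count T_count G_count C_count hT hG hC,
    pvFold_eq A_count T_count G_count C_count hT hG hC A_count.length le_rfl ""]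
  rfl
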